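-- pv_equiv track=rewrite | github.com/DongEon31/CodingTest_with_Python | LEVEL2/구명보트.py | solution
-- ===== SOURCE A (Python) =====
-- from collections import deque
--
-- def solution(people, limit):
--     answer = 0
--     d = deque(sorted(people))
--
--     while d:
--         if len(d) == 1: # 한 명 남은 경우
--             d.pop()
--         elif d[0] + d[-1] <= limit: # 최대, 최소를 한 보트에 태우는 경우
--             d.pop()
--             d.popleft()
--         elif d[-1] + d[-2] <= limit: # 가장 작은 두 명을 한 보트에 태우는 경우
--             d.pop()
--             d.pop()
--         else: # 한 명밖에 못 타는 경우
--             d.pop()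
--         answer += 1
--     return answer
-- ===== SOURCE B (Python) =====
-- def solution(people, limit):
--     p = sorted(people)
--     i, j = 0, len(p) - 1
--     boats = 0
--     while i <= j:
--         if p[i] + p[j] <= limit:
--             i += 1
--         j -= 1
--         boats += 1
--     return boats
-- ===== Notes on version B (the rewrite author's own statement) =====
-- stated objective: idiomatic
-- what changed: Replaces the deque with in-place two-pointer indices over the sorted list and a two-way branch, dropping A's explicit single-element case and its unreachable 'two heaviest together' branch.
import Mathlib
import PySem

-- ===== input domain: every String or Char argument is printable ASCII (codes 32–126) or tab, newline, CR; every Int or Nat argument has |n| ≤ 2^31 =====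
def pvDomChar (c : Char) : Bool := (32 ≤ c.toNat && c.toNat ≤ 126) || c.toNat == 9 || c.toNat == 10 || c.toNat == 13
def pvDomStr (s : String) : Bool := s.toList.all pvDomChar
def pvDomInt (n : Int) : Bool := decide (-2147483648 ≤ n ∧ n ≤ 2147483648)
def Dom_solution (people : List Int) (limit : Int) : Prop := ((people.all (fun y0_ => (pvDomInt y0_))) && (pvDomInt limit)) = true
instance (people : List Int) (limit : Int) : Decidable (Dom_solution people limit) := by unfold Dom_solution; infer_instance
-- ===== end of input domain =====

-- B replaces A's deque and four-way branch by two pointer indices into the sorted list with a two-way branch (idiomatic; same result).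

-- ===== PORT A =====
-- A's while loop over the deque d (front = list head): pop = dropLast, popleft = tail;
-- d[0], d[-1], d[-2] are PySem.List.pyGetD (in range on every reachable call)
def solLoopA (limit : Int) : List Int → Int → Int
  | [], ans => ans
  | [_], ans => solLoopA limit [] (ans + 1)
  | x :: y :: rest, ans =>
    if PySem.List.pyGetD (x :: y :: rest) 0 0 + PySem.List.pyGetD (x :: y :: rest) (-1) 0 ≤ limit then
      solLoopA limit (x :: y :: rest).dropLast.tail (ans + 1)
    else if PySem.List.pyGetD (x :: y :: rest) (-1) 0 + PySem.List.pyGetD (x :: y :: rest) (-2) 0 ≤ limit then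
      solLoopA limit (x :: y :: rest).dropLast.dropLast (ans + 1)
    else
      solLoopA limit (x :: y :: rest).dropLast (ans + 1)
  termination_by d _ => d.length
  decreasing_by all_goals simp

def solution (people : List Int) (limit : Int) : Int :=
  solLoopA limit (PySem.List.sorted people (fun x => x) false) 0

-- ===== PORT B =====
-- B's while i ≤ j loop: i += 1 only when the lightest/heaviest pair fits; j -= 1 and boats += 1 every iteration
def solLoopB (p : List Int) (limit : Int) (i j boats : Int) : Int :=
  if i ≤ j then
    if PySem.List.pyGetD p i 0 + PySem.List.pyGetD p j 0 ≤ limit then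
      solLoopB p limit (i + 1) (j - 1) (boats + 1)
    else
      solLoopB p limit i (j - 1) (boats + 1)
  else boats
  termination_by (j - i + 1).toNat
  decreasing_by all_goals omega

def solution_alt (people : List Int) (limit : Int) : Int :=
  let p := PySem.List.sorted people (fun x => x) false
  solLoopB p limit 0 (PySem.List.len p - 1) 0

-- ===== PRECONDITION & SPEC =====
def Spec_solution (people : List Int) (limit : Int) (out : Int) : Prop := out = solution_alt people limit
instance (people : List Int) (limit : Int) (out : Int) : Decidable (Spec_solution people limit out) := by unfold Spec_solution; infer_instance

-- ===== CLAIM (what is proved, stated in full; the proofs are below) =====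
def Claim_equal_solution : Prop := ∀ (people : List Int) (limit : Int), Dom_solution people limit → Spec_solution people limit (solution people limit)

-- ===== LEMMAS AND PROOFS =====

theorem tail_take' (l : List Int) (n : Nat) : (l.take n).tail = l.tail.take (n - 1) := by
  rw [← List.drop_one, List.drop_take, List.drop_one]

theorem seg_getElem (p : List Int) (K n r : Nat) (h : K + r < p.length)
    (hh : r < ((p.drop K).take n).length) :
    ((p.drop K).take n)[r] = p[K + r] := by
  rw [List.getElem_take, List.getElem_drop]

-- B's loop at pointers (i, j) computes A's loop on the deque p[i..j]; sortedness of p kills A's third branch.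
theorem loopB_eq_loopA (p : List Int) (limit : Int) (hp : p.Pairwise (· ≤ ·)) :
    ∀ (fuel : Nat) (i j boats : Int), (j - i + 1).toNat ≤ fuel → 0 ≤ i → j < (p.length : Int) →
    solLoopB p limit i j boats
      = solLoopA limit ((p.drop i.toNat).take (j - i + 1).toNat) boats := by
  intro fuel
  induction fuel with
  | zero =>
    intro i j boats hf hi hj
    have h0 : (j - i + 1).toNat = 0 := by omega
    rw [solLoopB, if_neg (by omega : ¬ i ≤ j), h0, List.take_zero, solLoopA]
  | succ fuel ih =>
    intro i j boats hf hi hj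
    by_cases hij : i ≤ j
    · have hm : j.toNat < p.length := by omega
      have hgi : PySem.List.pyGetD p i 0 = p[i.toNat] :=
        PySem.List.pyGetD_eq_getElem p 0 hi (by omega)
      have hgj : PySem.List.pyGetD p j 0 = p[j.toNat] :=
        PySem.List.pyGetD_eq_getElem p 0 (by omega) (by omega)
      have hdrop : p.drop i.toNat = p[i.toNat] :: p.drop (i.toNat + 1) :=
        (List.getElem_cons_drop (by omega)).symm
      by_cases hone : i = j
      · -- single-element segment: A pops it; B's i', j-1 cross either way
        have h1 : (j - i + 1).toNat = 1 := by omega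
        rw [h1, hdrop, List.take_succ_cons, List.take_zero]
        rw [solLoopB, if_pos hij]
        have done1 : ∀ b : Int, solLoopA limit [p[i.toNat]] b = b + 1 := by
          intro b; rw [solLoopA, solLoopA]
        split_ifs with hc
        · rw [solLoopB, if_neg (by omega), done1]
        · rw [solLoopB, if_neg (by omega), done1]
      · -- at least two elements
        have hKM : i.toNat < j.toNat := by omega
        have hlen1 : ((p.drop (i.toNat + 1)).take (j.toNat - i.toNat)).length
            = j.toNat - i.toNat := by
          simp [List.length_take, List.length_drop]; omega
        obtain ⟨y, rest, ht⟩ :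
            ∃ y rest, (p.drop (i.toNat + 1)).take (j.toNat - i.toNat) = y :: rest := by
          rcases hcase : (p.drop (i.toNat + 1)).take (j.toNat - i.toNat) with - | ⟨y, rest⟩
          · rw [hcase] at hlen1; simp at hlen1; omega
          · exact ⟨y, rest, rfl⟩
        have hseg : (p.drop i.toNat).take (j - i + 1).toNat
            = p[i.toNat] :: y :: rest := by
          rw [show (j - i + 1).toNat = (j.toNat - i.toNat) + 1 from by omega,
              hdrop, List.take_succ_cons, ht]
        have hrestlen : j.toNat - i.toNat = rest.length + 1 := by
          have := congrArg List.length ht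
          rw [hlen1] at this; simpa using this
        have hseglen : (p[i.toNat] :: y :: rest).length = j.toNat - i.toNat + 1 := by
          simp only [List.length_cons]; omega
        have hsegtake : p[i.toNat] :: y :: rest
            = (p.drop i.toNat).take (j.toNat - i.toNat + 1) := by
          rw [← hseg]; congr 1; omega
        have hlast : PySem.List.pyGetD (p[i.toNat] :: y :: rest) (-1) 0 = p[j.toNat] := by
          rw [PySem.List.pyGetD_neg_ofNat _ 1 0 (by omega) (by simp)]
          refine (getElem_congr hsegtake (show (p[i.toNat] :: y :: rest).length - 1
              = j.toNat - i.toNat from by omega) (by omega)).trans ?_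
          refine (seg_getElem p i.toNat _ _ (by omega) (by rw [← hsegtake]; omega)).trans ?_
          exact getElem_congr rfl (by omega) (by omega)
        have hsnd : PySem.List.pyGetD (p[i.toNat] :: y :: rest) (-2) 0 = p[j.toNat - 1] := by
          rw [PySem.List.pyGetD_neg_ofNat _ 2 0 (by omega) (by omega)]
          refine (getElem_congr hsegtake (show (p[i.toNat] :: y :: rest).length - 2
              = j.toNat - i.toNat - 1 from by omega) (by omega)).trans ?_
          refine (seg_getElem p i.toNat _ _ (by omega) (by rw [← hsegtake]; omega)).trans ?_
          exact getElem_congr rfl (by omega) (by omega)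
        have hmono : p[i.toNat]'(by omega) ≤ p[j.toNat - 1]'(by omega) := by
          rcases Nat.lt_or_ge i.toNat (j.toNat - 1) with h | h
          · exact List.pairwise_iff_getElem.mp hp i.toNat (j.toNat - 1) (by omega) (by omega) h
          · exact le_of_eq (getElem_congr rfl (by omega) (by omega))
        have hDlen : (p.drop i.toNat).length = p.length - i.toNat := by simp
        have hpop2 : (p[i.toNat] :: y :: rest).dropLast
            = (p.drop i.toNat).take (j.toNat - i.toNat) := by
          rw [hsegtake, List.dropLast_eq_take, List.take_take]
          congr 1
          rw [List.length_take]; omega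
        have hpop1 : (p[i.toNat] :: y :: rest).dropLast.tail
            = (p.drop (i.toNat + 1)).take (j.toNat - i.toNat - 1) := by
          rw [hpop2, tail_take', List.tail_drop]
        rw [hseg, solLoopB, if_pos hij, hgi, hgj]
        rw [solLoopA, PySem.List.pyGetD_zero_cons, hlast, hsnd]
        by_cases hc : p[i.toNat] + p[j.toNat] ≤ limit
        · rw [if_pos hc, if_pos hc, hpop1]
          rw [ih (i + 1) (j - 1) (boats + 1) (by omega) (by omega) (by omega),
              show (j - 1 - (i + 1) + 1).toNat = j.toNat - i.toNat - 1 from by omega,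
              show (i + 1).toNat = i.toNat + 1 from by omega]
        · have hub : ¬ (p[j.toNat]'(by omega) + p[j.toNat - 1]'(by omega) ≤ limit) := by omega
          rw [if_neg hc, if_neg hc, if_neg hub, hpop2]
          rw [ih i (j - 1) (boats + 1) (by omega) hi (by omega),
              show (j - 1 - i + 1).toNat = j.toNat - i.toNat from by omega]
    · have h0 : (j - i + 1).toNat = 0 := by omega
      rw [solLoopB, if_neg hij, h0, List.take_zero, solLoopA]

theorem solution_eq (people : List Int) (limit : Int) :
    solution people limit = solution_alt people limit := by
  unfold solution solution_alt
  have hp := PySem.List.sorted_pairwise people (fun x => x)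
  have hlen : PySem.List.len (PySem.List.sorted people (fun x => x) false)
      = ((PySem.List.sorted people (fun x => x) false).length : Int) :=
    PySem.List.len_eq _
  have h := loopB_eq_loopA (PySem.List.sorted people (fun x => x) false) limit hp
      (PySem.List.sorted people (fun x => x) false).length 0
      (PySem.List.len (PySem.List.sorted people (fun x => x) false) - 1) 0
      (by rw [hlen]; omega) le_rfl (by rw [hlen]; omega)
  rw [h, show ((0 : Int)).toNat = 0 from rfl, List.drop_zero,
      show ((PySem.List.len (PySem.List.sorted people (fun x => x) false) - 1) - 0 + 1).toNat
        = (PySem.List.sorted people (fun x => x) false).length from by rw [hlen]; omega,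
      List.take_length]

-- ===== VERDICT (by name: the statement is the Claim_ definition above) =====
theorem solution_spec : Claim_equal_solution := by
  intro people limit _
  unfold Spec_solution
  exact solution_eq people limit
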